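-- pv_equiv track=rewrite | github.com/hariharanragothaman/codeforces-solutions | contests/1008/1008A-Romaji.py | romaji
-- ===== SOURCE A (Python) =====
-- def romaji(s):
--     vowels = 'aeiou'
--
--     if len(s) == 1 and s not in vowels and s != 'n':
--         return False
--
--     i = 0
--     while i < len(s)-1:
--         # Exception
--         if s[i] == 'n':
--             i += 1
--         elif s[i] not in vowels and s[i+1] in vowels:
--             i += 2
--         # Standard non-bernalese scenario
--         elif s[i] not in vowels and s[i+1] not in vowels:
--             return False
--         # Exception
--         elif s[i] in vowels:
--             i += 1
--
--     # Checking for boundary condition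
--     if s[-1] == 'n' or s[-1] in vowels:
--         return True
--     else:
--         return False
--
--     return True
-- ===== SOURCE B (Python) =====
-- def romaji(s):
--     vowels = 'aeiou'
--     for i in range(len(s)):
--         if s[i] not in vowels and s[i] != 'n':
--             if not (i + 1 < len(s) and s[i + 1] in vowels):
--                 return False
--     return True
-- ===== Notes on version B (the rewrite author's own statement) =====
-- stated objective: simpler
-- what changed: Replaces A's variable-stride syllable walk (advance 1 over n/vowel, 2 over consonant+vowel) plus separate single-char and trailing-boundary checks with one uniform per-index scan: every non-'n' consonant must be immediately followed by a vowel; no boundary postlude is needed.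
import Mathlib
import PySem

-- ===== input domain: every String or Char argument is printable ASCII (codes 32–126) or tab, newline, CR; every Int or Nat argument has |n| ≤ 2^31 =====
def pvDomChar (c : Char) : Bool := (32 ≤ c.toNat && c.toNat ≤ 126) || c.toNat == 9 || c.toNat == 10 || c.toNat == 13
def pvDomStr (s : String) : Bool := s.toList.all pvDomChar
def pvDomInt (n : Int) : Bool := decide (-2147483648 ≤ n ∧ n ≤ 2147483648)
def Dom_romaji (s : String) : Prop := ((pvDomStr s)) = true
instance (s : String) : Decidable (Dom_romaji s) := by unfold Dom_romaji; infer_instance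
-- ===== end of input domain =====

-- B replaces A's variable-stride syllable walk (advance 1 over 'n'/vowel, 2 over
-- consonant+vowel) and its single-char/boundary postludes with one uniform per-index
-- scan checking each non-'n' consonant is followed by a vowel; objective: simpler.

-- shared helper: Python "c in 'aeiou'" for a single character
def pvVowel (c : Char) : Bool := ['a', 'e', 'i', 'o', 'u'].contains c

-- ===== PORT A =====
-- A's while loop: i advances by 1 over 'n'/vowel, by 2 over consonant+vowel,
-- returns False on consonant+consonant; after the loop the s[-1] boundary check
-- (in range since Pre_ excludes the empty string).
def romajiGo (cs : List Char) (i : Nat) : Bool :=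
  if _h : i < cs.length - 1 then
    if cs.getD i ' ' = 'n' then romajiGo cs (i + 1)
    else if !pvVowel (cs.getD i ' ') && pvVowel (cs.getD (i + 1) ' ') then romajiGo cs (i + 2)
    else if !pvVowel (cs.getD i ' ') && !pvVowel (cs.getD (i + 1) ' ') then false
    else romajiGo cs (i + 1)
  else
    (cs.getD (cs.length - 1) ' ' = 'n') || pvVowel (cs.getD (cs.length - 1) ' ')
termination_by cs.length - 1 - i

def romaji (s : String) : Bool :=
  let cs := s.toList
  -- 'len(s) == 1 and s not in vowels and s != "n"': for a length-1 string the
  -- substring test 's not in vowels' is exactly 'its only character is not a vowel'.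
  if cs.length = 1 && !pvVowel (cs.getD 0 ' ') && !(cs.getD 0 ' ' = 'n') then false
  else romajiGo cs 0

-- ===== PORT B =====
-- B's for-loop over range(len(s)): each non-'n' consonant must be followed by a vowel.
def romajiAltGo (cs : List Char) (i : Nat) : Bool :=
  if i < cs.length then
    if !pvVowel (cs.getD i ' ') && !(cs.getD i ' ' = 'n') then
      if i + 1 < cs.length && pvVowel (cs.getD (i + 1) ' ') then romajiAltGo cs (i + 1)
      else false
    else romajiAltGo cs (i + 1)
  else true
termination_by cs.length - i

def romaji_alt (s : String) : Bool := romajiAltGo s.toList 0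

-- ===== PRECONDITION & SPEC =====
-- Pre_ excludes only the empty string, on which A raises IndexError at s[-1].
def Pre_romaji (s : String) : Prop := s ≠ ""
instance (s : String) : Decidable (Pre_romaji s) := by unfold Pre_romaji; infer_instance
def pvWitness_romaji : String := "ninja"

def Spec_romaji (s : String) (out : Bool) : Prop := out = romaji_alt s
instance (s : String) (out : Bool) : Decidable (Spec_romaji s out) := by unfold Spec_romaji; infer_instance

-- ===== CLAIM (what is proved, stated in full; the proofs are below) =====
def Claim_equal_romaji : Prop := ∀ (s : String), Dom_romaji s → Pre_romaji s → Spec_romaji s (romaji s)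

-- ===== LEMMAS AND PROOFS =====

-- "index j holds a non-'n' consonant"
def consAt (cs : List Char) (j : Nat) : Prop :=
  pvVowel (cs.getD j ' ') = false ∧ cs.getD j ' ' ≠ 'n'

-- characterization of B's loop: True iff every non-'n' consonant at or after i is
-- immediately followed by an in-range vowel
theorem altGo_iff (cs : List Char) (i : Nat) :
    romajiAltGo cs i = true ↔
      ∀ j, i ≤ j → j < cs.length → consAt cs j →
        (j + 1 < cs.length ∧ pvVowel (cs.getD (j + 1) ' ') = true) := by
  induction i using romajiAltGo.induct cs with
  | case1 x hx hcons hnext ih =>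
    rw [romajiAltGo]
    simp only [hx, if_pos, hcons, hnext]
    rw [ih]
    simp only [Bool.and_eq_true, decide_eq_true_eq] at hnext
    constructor
    · intro h j hij hj hc
      rcases Nat.eq_or_lt_of_le hij with rfl | hlt
      · exact hnext
      · exact h j hlt hj hc
    · intro h j hij hj hc
      exact h j (Nat.le_of_succ_le hij) hj hc
  | case2 x hx hcons hnext =>
    rw [romajiAltGo]
    simp only [hx, if_pos, hcons, if_neg hnext]
    simp only [Bool.and_eq_true, Bool.not_eq_true', decide_eq_true_eq] at hcons hnext
    constructor
    · intro h; cases h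
    · intro h
      have hc : consAt cs x := ⟨hcons.1, of_decide_eq_false hcons.2⟩
      exact absurd (h x le_rfl hx hc) hnext
  | case3 x hx hcons ih =>
    rw [romajiAltGo]
    simp only [hx, if_pos, if_neg hcons]
    rw [ih]
    have hnc : ¬ consAt cs x := by
      intro hc
      apply hcons
      simp only [Bool.and_eq_true, Bool.not_eq_true']
      exact ⟨hc.1, decide_eq_false hc.2⟩
    constructor
    · intro h j hij hj hc
      rcases Nat.eq_or_lt_of_le hij with rfl | hlt
      · exact absurd hc hnc
      · exact h j hlt hj hc
    · intro h j hij hj hc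
      exact h j (Nat.le_of_succ_le hij) hj hc
  | case4 x hx =>
    rw [romajiAltGo]
    simp only [hx]
    constructor
    · intro _ j hij hj _; omega
    · intro _; rfl

-- characterization of A's loop: True iff every non-'n' consonant before the last index
-- (at or after i) is followed by a vowel AND the last character is 'n' or a vowel;
-- the key step is that the index A skips over (after consonant+vowel) is a vowel.
theorem go_iff (cs : List Char) (i : Nat) :
    romajiGo cs i = true ↔
      ((∀ j, i ≤ j → j + 1 < cs.length → consAt cs j → pvVowel (cs.getD (j + 1) ' ') = true) ∧
        (cs.getD (cs.length - 1) ' ' = 'n' ∨ pvVowel (cs.getD (cs.length - 1) ' ') = true)) := by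
  induction i using romajiGo.induct cs with
  | case1 x hx hn ih =>
    rw [romajiGo]
    simp only [hx, dif_pos, hn, if_pos]
    rw [ih]
    constructor
    · rintro ⟨h1, h2⟩
      refine ⟨fun j hij hj hc => ?_, h2⟩
      rcases Nat.eq_or_lt_of_le hij with rfl | hlt
      · exact absurd hn hc.2
      · exact h1 j hlt hj hc
    · rintro ⟨h1, h2⟩
      exact ⟨fun j hij hj hc => h1 j (Nat.le_of_succ_le hij) hj hc, h2⟩
  | case2 x hx hn hcv ih =>
    rw [romajiGo]
    simp only [hx, dif_pos, hn, hcv, if_pos, if_false]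
    rw [ih]
    simp only [Bool.and_eq_true, Bool.not_eq_true'] at hcv
    constructor
    · rintro ⟨h1, h2⟩
      refine ⟨fun j hij hj hc => ?_, h2⟩
      rcases Nat.lt_or_ge j (x + 2) with hlt | hge
      · have hj2 : j = x ∨ j = x + 1 := by omega
        rcases hj2 with rfl | rfl
        · exact hcv.2
        · exact (Bool.false_ne_true (hc.1 ▸ hcv.2)).elim
      · exact h1 j hge hj hc
    · rintro ⟨h1, h2⟩
      exact ⟨fun j hij hj hc => h1 j (by omega) hj hc, h2⟩
  | case3 x hx hn hcv hcc =>
    rw [romajiGo]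
    simp only [hx, dif_pos, hn, hcv, hcc, if_pos, Bool.false_eq_true, if_false]
    simp only [Bool.and_eq_true, Bool.not_eq_true'] at hcc
    constructor
    · intro h; cases h
    · rintro ⟨h1, _⟩
      have hc : consAt cs x := ⟨hcc.1, hn⟩
      have := h1 x le_rfl (by omega) hc
      rw [this] at hcc
      simp at hcc
  | case4 x hx hn hcv hcc ih =>
    rw [romajiGo]
    simp only [hx, dif_pos, hn, hcv, hcc, Bool.false_eq_true, if_false]
    rw [ih]
    have hv : pvVowel (cs.getD x ' ') = true := by
      by_contra hfv
      rw [Bool.not_eq_true] at hfv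
      by_cases hb : pvVowel (cs.getD (x + 1) ' ') = true
      · exact hcv (by rw [hfv, hb]; rfl)
      · rw [Bool.not_eq_true] at hb
        exact hcc (by rw [hfv, hb]; rfl)
    constructor
    · rintro ⟨h1, h2⟩
      refine ⟨fun j hij hj hc => ?_, h2⟩
      rcases Nat.eq_or_lt_of_le hij with rfl | hlt
      · exact (Bool.false_ne_true (hc.1 ▸ hv)).elim
      · exact h1 j hlt hj hc
    · rintro ⟨h1, h2⟩
      exact ⟨fun j hij hj hc => h1 j (Nat.le_of_succ_le hij) hj hc, h2⟩
  | case5 x hx =>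
    rw [romajiGo]
    simp only [hx]
    constructor
    · intro h
      refine ⟨fun j hij hj hc => ?_, ?_⟩
      · omega
      · simpa using h
    · rintro ⟨_, h2⟩
      simpa using h2

theorem toList_ne_nil (s : String) (h : s ≠ "") : s.toList ≠ [] :=
  fun hnil => h (String.toList_eq_nil_iff.mp hnil)

theorem main_eq (s : String) (hpre : s ≠ "") : romaji s = romaji_alt s := by
  simp only [romaji, romaji_alt]
  have hne : s.toList ≠ [] := toList_ne_nil s hpre
  have hlen : 1 ≤ s.toList.length := by
    cases h : s.toList with
    | nil => exact absurd h hne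
    | cons a l => simp
  set cs := s.toList with hcs
  split_ifs with hguard
  · -- A's single-character early False: B's scan also rejects at index 0
    simp only [Bool.and_eq_true, Bool.not_eq_true', decide_eq_true_eq] at hguard
    symm
    rw [← Bool.not_eq_true, altGo_iff]
    intro hall
    have hc : consAt cs 0 := ⟨hguard.1.2, of_decide_eq_false hguard.2⟩
    have := hall 0 le_rfl (by omega) hc
    omega
  · rw [Bool.eq_iff_iff, go_iff, altGo_iff]
    constructor
    · rintro ⟨h1, h2⟩ j _ hj hc
      rcases Nat.lt_or_ge (j + 1) cs.length with hlt | hge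
      · exact ⟨hlt, h1 j (by omega) hlt hc⟩
      · have hj1 : j = cs.length - 1 := by omega
        rw [hj1] at hc
        rcases h2 with hn | hvl
        · exact (hc.2 hn).elim
        · exact (Bool.false_ne_true (hc.1 ▸ hvl)).elim
    · intro h
      refine ⟨fun j _ hj1 hc => (h j (by omega) (by omega) hc).2, ?_⟩
      by_cases hcl : consAt cs (cs.length - 1)
      · have := h (cs.length - 1) (by omega) (by omega) hcl
        omega
      · unfold consAt at hcl
        push Not at hcl
        rcases Bool.eq_false_or_eq_true (pvVowel (cs.getD (cs.length - 1) ' ')) with hf | ht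
        · exact Or.inr hf
        · exact Or.inl (hcl ht)

-- ===== VERDICT (by name: the statement is the Claim_ definition above) =====
theorem romaji_spec : Claim_equal_romaji := by
  intro s _ hpre
  unfold Spec_romaji
  exact main_eq s hpre
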